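-- pv_equiv track=rewrite | github.com/Hohrandrey/self-study | Yandex/train of algoritms/2026-march/block-1/sorev2/B.py | min_folds
-- ===== SOURCE A (Python) =====
-- def min_folds(size, target):
--     if size <= target:
--         return 0
--     folds = 0
--     while size > target:
--         size = (size + 1) // 2
--         folds += 1
--     return folds
-- ===== SOURCE B (Python) =====
-- def min_folds(size, target):
--     if size <= target:
--         return 0
--     q = -(-size // target)          # ceil(size / target)
--     return (q - 1).bit_length()     # smallest f with 2**f >= q
-- ===== Notes on version B (the rewrite author's own statement) =====
-- stated objective: alternative
-- what changed: B replaces A's while loop of ceiling-halvings by a closed form: the answer is the bit length of ceil(size/target)-1, computed with one ceiling division and one bit_length call, no loop.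
import Mathlib
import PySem

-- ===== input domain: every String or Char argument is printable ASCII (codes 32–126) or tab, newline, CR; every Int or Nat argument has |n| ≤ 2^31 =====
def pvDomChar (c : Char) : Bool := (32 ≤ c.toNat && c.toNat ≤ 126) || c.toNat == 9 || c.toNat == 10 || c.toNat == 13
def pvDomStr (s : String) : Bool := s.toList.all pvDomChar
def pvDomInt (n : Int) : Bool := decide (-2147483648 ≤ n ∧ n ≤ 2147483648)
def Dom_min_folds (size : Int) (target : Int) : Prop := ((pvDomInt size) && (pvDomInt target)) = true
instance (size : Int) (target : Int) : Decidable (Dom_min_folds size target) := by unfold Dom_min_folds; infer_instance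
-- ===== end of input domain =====

-- B computes the fold count in closed form (ceiling division + bit_length) instead of A's halving loop;
-- return-value equivalence proved on Pre_ (where A's loop terminates).

-- ===== PORT A =====
-- A's while loop: size is ceiling-halved and folds incremented while size > target.
-- fuel = (size - target).toNat bounds the iteration count (size drops by ≥ 1 each step on Pre_);
-- it only makes the recursion total and is never exhausted on admitted inputs.
def pvLoopA (fuel : Nat) (size target folds : Int) : Int :=
  match fuel with
  | 0 => folds
  | n + 1 =>
    if size > target then pvLoopA n (PySem.Int.floordiv (size + 1) 2) target (folds + 1)
    else folds

def min_folds (size : Int) (target : Int) : Int :=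
  if size ≤ target then 0
  else pvLoopA (size - target).toNat size target 0

-- ===== PORT B =====
-- Source B line for line: guard, q = -(-size // target), (q - 1).bit_length()
-- (PySem.Int.bitLength is Python's int.bit_length, exact including negatives).
def min_folds_alt (size : Int) (target : Int) : Int :=
  if size ≤ target then 0
  else
    let q : Int := -(PySem.Int.floordiv (-size) target)
    ((PySem.Int.bitLength (q - 1) : Nat) : Int)

-- ===== PRECONDITION & SPEC =====
-- Pre_ excludes exactly the inputs where A's while loop never terminates (Python hangs):
-- target ≤ 0 with size > target, where ceiling-halving can never bring size below target.
def Pre_min_folds (size : Int) (target : Int) : Prop := size ≤ target ∨ 1 ≤ target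
instance (size : Int) (target : Int) : Decidable (Pre_min_folds size target) := by
  unfold Pre_min_folds; infer_instance

def pvWitness_min_folds : Int × Int := (100, 3)

def Spec_min_folds (size : Int) (target : Int) (out : Int) : Prop := out = min_folds_alt size target
instance (size : Int) (target : Int) (out : Int) : Decidable (Spec_min_folds size target out) := by
  unfold Spec_min_folds; infer_instance

-- ===== CLAIM (what is proved, stated in full; the proofs are below) =====
def Claim_equal_min_folds : Prop := ∀ (size : Int) (target : Int), Dom_min_folds size target → Pre_min_folds size target → Spec_min_folds size target (min_folds size target)

-- ===== LEMMAS AND PROOFS =====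

-- q = -((-s) // t) is the ceiling of s / t: it is the unique integer with t*(q-1) < s ≤ t*q.
theorem pvCeilSpec (s t : Int) (ht : 1 ≤ t) :
    t * (-(PySem.Int.floordiv (-s) t) - 1) < s ∧ s ≤ t * (-(PySem.Int.floordiv (-s) t)) := by
  rw [PySem.Int.floordiv_eq_ediv_of_pos (by omega)]
  have hd := Int.mul_ediv_add_emod (-s) t
  have hr0 := Int.emod_nonneg (-s) (by omega : t ≠ 0)
  have hrt := Int.emod_lt_of_pos (-s) (by omega : 0 < t)
  constructor <;> nlinarith

-- B's closed form satisfies A's loop recurrence: one ceiling-halving of size costs exactly one bit.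
theorem pvAltStep (s t : Int) (ht : 1 ≤ t) (hts : t < s) :
    min_folds_alt s t = 1 + min_folds_alt (PySem.Int.floordiv (s + 1) 2) t := by
  have h2 : PySem.Int.floordiv (s + 1) 2 = (s + 1) / 2 :=
    PySem.Int.floordiv_eq_ediv_of_pos (by norm_num)
  set s' : Int := PySem.Int.floordiv (s + 1) 2 with hs'
  have hs'bound : 2 * s' - 1 ≤ s ∧ s ≤ 2 * s' := by rw [h2]; omega
  obtain ⟨hq1, hq2⟩ := pvCeilSpec s t ht
  set q : Int := -(PySem.Int.floordiv (-s) t) with hq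
  have hq3 : 2 ≤ q := by nlinarith
  by_cases hcase : s' ≤ t
  · -- the halved size already fits: A does exactly one more fold, and q = 2 so bit_length 1 = 1
    have hqeq : q = 2 := by nlinarith
    simp only [min_folds_alt, if_neg (by omega : ¬ s ≤ t), if_pos hcase, ← hq, hqeq]
    decide
  · obtain ⟨hq1', hq2'⟩ := pvCeilSpec s' t ht
    set q' : Int := -(PySem.Int.floordiv (-s') t) with hq'
    -- q' = ceil(q/2): sandwich 2*(q'-1) < q ≤ 2*q'
    have hup : q ≤ 2 * q' := by
      have h1 : t * (q - 1) < t * (2 * q') := by nlinarith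
      have := lt_of_mul_lt_mul_left h1 (by omega : (0:Int) ≤ t)
      omega
    have hlo : 2 * (q' - 1) < q := by
      have h1 : t * (2 * (q' - 1)) < t * q := by nlinarith
      have := lt_of_mul_lt_mul_left h1 (by omega : (0:Int) ≤ t)
      omega
    have hq'3 : 2 ≤ q' := by nlinarith
    have hhalf : PySem.Int.floordiv (q - 1) 2 = q' - 1 := by
      rw [PySem.Int.floordiv_eq_ediv_of_pos (by norm_num)]; omega
    simp only [min_folds_alt, if_neg (by omega : ¬ s ≤ t), if_neg (by omega : ¬ s' ≤ t),
      ← hq, ← hq']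
    rw [PySem.Int.bitLength_of_pos (by omega : 0 < q - 1), hhalf]
    push_cast
    ring

-- Main invariant: on Pre_ (1 ≤ target), with enough fuel, A's remaining loop starting at
-- counter c equals c plus B's closed form for the current size.
theorem pvMain (n : Nat) : ∀ (size target : Int), 1 ≤ target → size ≤ target + n →
    ∀ (fuel : Nat) (c : Int), size - target ≤ (fuel : Int) →
    pvLoopA fuel size target c = c + min_folds_alt size target := by
  induction n with
  | zero =>
    intro size target ht hle fuel c _
    have hst : size ≤ target := by omega
    have hA : pvLoopA fuel size target c = c := by
      cases fuel with
      | zero => rfl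
      | succ m => simp [pvLoopA, not_lt.mpr hst]
    rw [hA, min_folds_alt, if_pos hst]; ring
  | succ n ih =>
    intro size target ht hle fuel c hf
    by_cases hst : size ≤ target
    · have hA : pvLoopA fuel size target c = c := by
        cases fuel with
        | zero => rfl
        | succ m => simp [pvLoopA, not_lt.mpr hst]
      rw [hA, min_folds_alt, if_pos hst]; ring
    · have hgt : size > target := by omega
      have hdiv : PySem.Int.floordiv (size + 1) 2 = (size + 1) / 2 :=
        PySem.Int.floordiv_eq_ediv_of_pos (by norm_num)
      push_cast at hle hf
      obtain ⟨a, rfl⟩ : ∃ a, fuel = a + 1 := by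
        cases fuel with
        | zero => exfalso; simp at hf; omega
        | succ m => exact ⟨m, rfl⟩
      push_cast at hf
      have hA : pvLoopA (a + 1) size target c
          = pvLoopA a (PySem.Int.floordiv (size + 1) 2) target (c + 1) := by
        simp only [pvLoopA, if_pos hgt]
      have hIH : pvLoopA a (PySem.Int.floordiv (size + 1) 2) target (c + 1)
          = (c + 1) + min_folds_alt (PySem.Int.floordiv (size + 1) 2) target :=
        ih _ target ht (by rw [hdiv]; omega) a (c + 1) (by rw [hdiv]; omega)
      rw [hA, hIH, pvAltStep size target ht hgt]; ring

-- ===== VERDICT (by name: the statement is the Claim_ definition above) =====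
theorem min_folds_spec : Claim_equal_min_folds := by
  intro size target _ hpre
  unfold Spec_min_folds min_folds
  by_cases hst : size ≤ target
  · rw [if_pos hst, min_folds_alt, if_pos hst]
  · rw [if_neg hst]
    have ht : 1 ≤ target := by
      rcases hpre with h | h
      · exact absurd h hst
      · exact h
    have := pvMain (size - target).toNat size target ht (by omega)
      (size - target).toNat 0 (by omega)
    rw [this]; ring
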